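-- pv_equiv track=rewrite | github.com/ETH-DISCO/graph-fsa | cellular-automata/helpers/mappings.py | map_x_to_start_state_id
-- ===== SOURCE A (Python) =====
-- def map_x_to_start_state_id(inputs):
--
--     ids = []
--     helper = 0
--
--     for x in inputs:
--         if x[0] == 1:
--             ids.append(0)
--         elif x[1] == 1 and helper == 0:
--             ids.append(1)
--             helper += 1
--         else:
--             ids.append(2)
--
--     return ids
-- ===== SOURCE B (Python) =====
-- def map_x_to_start_state_id(inputs):
--     special = next((i for i, x in enumerate(inputs) if x[0] != 1 and x[1] == 1), None)
--     return [0 if x[0] == 1 else (1 if i == special else 2)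
--             for i, x in enumerate(inputs)]
-- ===== Notes on version B (the rewrite author's own statement) =====
-- stated objective: alternative
-- what changed: Replaces the stateful 'helper' flag threaded through one loop by a two-pass decomposition: first find the index of the first row with x[0]!=1 and x[1]==1, then map each row by comparing its index to it.
import Mathlib
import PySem

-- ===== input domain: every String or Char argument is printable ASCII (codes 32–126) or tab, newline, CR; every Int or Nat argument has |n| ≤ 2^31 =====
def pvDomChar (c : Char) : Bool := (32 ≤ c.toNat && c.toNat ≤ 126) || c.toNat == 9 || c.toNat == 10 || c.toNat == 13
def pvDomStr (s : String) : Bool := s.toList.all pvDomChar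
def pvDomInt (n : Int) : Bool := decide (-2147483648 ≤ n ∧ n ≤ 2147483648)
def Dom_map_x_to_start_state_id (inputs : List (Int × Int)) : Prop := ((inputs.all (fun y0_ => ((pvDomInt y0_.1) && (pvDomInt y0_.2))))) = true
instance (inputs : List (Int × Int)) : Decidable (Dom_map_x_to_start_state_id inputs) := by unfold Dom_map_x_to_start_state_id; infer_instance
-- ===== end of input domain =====

-- B replaces A's stateful helper flag by a two-pass decomposition (find the special index, then map); objective: alternative.

-- ===== PORT A =====
-- A's loop over inputs, carrying (ids, helper) exactly as the Python does.
def map_x_to_start_state_id (inputs : List (Int × Int)) : List Int :=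
  (inputs.foldl (fun (st : List Int × Int) x =>
      if x.1 = 1 then (st.1 ++ [0], st.2)
      else if x.2 = 1 ∧ st.2 = 0 then (st.1 ++ [1], st.2 + 1)
      else (st.1 ++ [2], st.2)) ([], 0)).1

-- ===== PORT B =====
-- first pass: index of the first row with x[0] != 1 and x[1] == 1 (Python's next(... enumerate ...))
def pvFindSpecial (inputs : List (Int × Int)) (i : Int) : Option Int :=
  match inputs with
  | [] => none
  | x :: xs => if x.1 ≠ 1 ∧ x.2 = 1 then some i else pvFindSpecial xs (i + 1)

-- second pass: the comprehension over enumerate(inputs)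
def pvMapB (inputs : List (Int × Int)) (i : Int) (special : Option Int) : List Int :=
  match inputs with
  | [] => []
  | x :: xs => (if x.1 = 1 then 0 else if some i = special then 1 else 2) :: pvMapB xs (i + 1) special

def map_x_to_start_state_id_alt (inputs : List (Int × Int)) : List Int :=
  pvMapB inputs 0 (pvFindSpecial inputs 0)

-- ===== PRECONDITION & SPEC =====
def Spec_map_x_to_start_state_id (inputs : List (Int × Int)) (out : List Int) : Prop := out = map_x_to_start_state_id_alt inputs
instance (inputs : List (Int × Int)) (out : List Int) : Decidable (Spec_map_x_to_start_state_id inputs out) := by unfold Spec_map_x_to_start_state_id; infer_instance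

-- ===== CLAIM (what is proved, stated in full; the proofs are below) =====
def Claim_equal_map_x_to_start_state_id : Prop := ∀ (inputs : List (Int × Int)), Dom_map_x_to_start_state_id inputs → Spec_map_x_to_start_state_id inputs (map_x_to_start_state_id inputs)

-- ===== LEMMAS AND PROOFS =====

-- recursive reading of A's loop (proof-only helper)
def pvRecA (inputs : List (Int × Int)) (h : Int) : List Int :=
  match inputs with
  | [] => []
  | x :: xs =>
      if x.1 = 1 then 0 :: pvRecA xs h
      else if x.2 = 1 ∧ h = 0 then 1 :: pvRecA xs (h + 1)
      else 2 :: pvRecA xs h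

theorem pvFoldA_eq (inputs : List (Int × Int)) : ∀ (acc : List Int) (h : Int),
    (inputs.foldl (fun (st : List Int × Int) x =>
      if x.1 = 1 then (st.1 ++ [0], st.2)
      else if x.2 = 1 ∧ st.2 = 0 then (st.1 ++ [1], st.2 + 1)
      else (st.1 ++ [2], st.2)) (acc, h)).1 = acc ++ pvRecA inputs h := by
  induction inputs with
  | nil => intro acc h; simp [pvRecA]
  | cons x xs ih =>
      intro acc h
      simp only [List.foldl, pvRecA]
      split_ifs with h1 h2 <;> simp [ih]

theorem pvFindSpecial_ge (inputs : List (Int × Int)) : ∀ (j k : Int),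
    pvFindSpecial inputs j = some k → j ≤ k := by
  induction inputs with
  | nil => intro j k hk; simp [pvFindSpecial] at hk
  | cons x xs ih =>
      intro j k hk
      simp only [pvFindSpecial] at hk
      split_ifs at hk with h1
      · have := Option.some.inj hk; omega
      · have := ih (j + 1) k hk; omega

theorem pvMapB_none (inputs : List (Int × Int)) : ∀ (j i : Int), i < j →
    pvMapB inputs j (some i) = pvMapB inputs j none := by
  induction inputs with
  | nil => intro j i _; rfl
  | cons x xs ih =>
      intro j i hij
      simp only [pvMapB]
      have hne : ¬ (some j = some i) := by simp; omega
      rw [ih (j + 1) i (by omega)]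
      simp [hne]

theorem pvRecA_nonzero (inputs : List (Int × Int)) : ∀ (h i : Int), h ≠ 0 →
    pvRecA inputs h = pvMapB inputs i none := by
  induction inputs with
  | nil => intro h i _; rfl
  | cons x xs ih =>
      intro h i hh
      simp only [pvRecA, pvMapB]
      by_cases h1 : x.1 = 1
      · simp [h1, ih h (i + 1) hh]
      · have hc : ¬ (x.2 = 1 ∧ h = 0) := fun hc => hh hc.2
        simp [h1, hc, ih h (i + 1) hh]

theorem pvRecA_zero (inputs : List (Int × Int)) : ∀ (i : Int),
    pvRecA inputs 0 = pvMapB inputs i (pvFindSpecial inputs i) := by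
  induction inputs with
  | nil => intro i; rfl
  | cons x xs ih =>
      intro i
      simp only [pvRecA, pvMapB, pvFindSpecial]
      by_cases h1 : x.1 = 1
      · simp [h1, ih (i + 1)]
      · by_cases h2 : x.2 = 1
        · have hrest : pvRecA xs 1 = pvMapB xs (i + 1) (some i) := by
            rw [pvMapB_none xs (i + 1) i (by omega)]
            exact pvRecA_nonzero xs 1 (i + 1) one_ne_zero
          simp [h1, h2, hrest]
        · have hne : ¬ (some i = pvFindSpecial xs (i + 1)) := by
            intro he
            cases hs : pvFindSpecial xs (i + 1) with
            | none => simp [hs] at he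
            | some k =>
                have := pvFindSpecial_ge xs (i + 1) k hs
                rw [hs] at he
                have := Option.some.inj he
                omega
          simp [h1, h2, hne, ih (i + 1)]

-- ===== VERDICT (by name: the statement is the Claim_ definition above) =====
theorem map_x_to_start_state_id_spec : Claim_equal_map_x_to_start_state_id := by
  intro inputs _
  unfold Spec_map_x_to_start_state_id map_x_to_start_state_id map_x_to_start_state_id_alt
  rw [pvFoldA_eq inputs [] 0, pvRecA_zero inputs 0]
  simp
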